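-- pv_equiv track=rewrite | github.com/bragaLeandro/ComputationalThinking | GlobalSolution/ex4.py | verifica_digitos
-- ===== SOURCE A (Python) =====
-- def verifica_digitos(cod_barras):
--     i = 0 #utilizada no for para percorrer o código de barras e verifica se tem dígito nele
--     c = 0 #utilizada no for para percorrer o código de barras e verifica se tem letra maíscula nele
--     cont_letras = 0 #conta a quantidade de letras
--     cont_dig = 0 #conta a quantidade de letras
--     letras = "ABCDEFGHIJKLMNOPQRSTUVWXYZ"
--     digitos = "0123456789"
--
--     for i in cod_barras: #percorre cod_barras para encontrar os dígitos
--         if i in digitos: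
--             cont_dig = cont_dig + 1
--
--     for c in cod_barras: #percorre o cod_barras para encontrar as letras maiusculas
--         if c in letras:
--             cont_letras = cont_letras + 1
--
--     if cont_dig == 8 and cont_letras == 7:
--         return True #Código de barras está correto
--     else:
--         return False #Código de barras está incorreto
-- ===== SOURCE B (Python) =====
-- def verifica_digitos(cod_barras):
--     cont_dig = sum(cod_barras.count(d) for d in "0123456789")
--     cont_letras = sum(cod_barras.count(l) for l in "ABCDEFGHIJKLMNOPQRSTUVWXYZ")
--     return cont_dig == 8 and cont_letras == 7
-- ===== Notes on version B (the rewrite author's own statement) =====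
-- stated objective: faster
-- what changed: Instead of scanning the input character by character in interpreted loops, B iterates over the two fixed alphabets and sums str.count(c) calls, moving all per-character work into C-level scans.
import Mathlib
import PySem

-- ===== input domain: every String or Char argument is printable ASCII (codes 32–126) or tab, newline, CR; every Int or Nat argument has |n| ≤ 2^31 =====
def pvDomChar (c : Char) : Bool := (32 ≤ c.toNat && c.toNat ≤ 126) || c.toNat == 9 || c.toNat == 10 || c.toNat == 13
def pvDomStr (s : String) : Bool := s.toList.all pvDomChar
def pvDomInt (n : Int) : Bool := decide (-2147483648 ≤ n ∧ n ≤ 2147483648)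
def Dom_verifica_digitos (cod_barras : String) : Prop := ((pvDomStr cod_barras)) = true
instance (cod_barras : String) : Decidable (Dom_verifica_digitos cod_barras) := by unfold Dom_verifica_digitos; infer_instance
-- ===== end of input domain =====

-- ===== PORT A =====
-- B iterates over the two fixed alphabets summing str.count instead of A's per-character scans (objective: faster, measured).
-- the single-char 'i in digitos' membership test is ported as list membership in the constant string's characters (exact for 1-char needles)
def verifica_digitos (cod_barras : String) : Bool :=
  let letras := "ABCDEFGHIJKLMNOPQRSTUVWXYZ"
  let digitos := "0123456789"
  let cont_dig : Int := cod_barras.toList.foldl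
    (fun cont_dig i => if i ∈ digitos.toList then cont_dig + 1 else cont_dig) 0
  let cont_letras : Int := cod_barras.toList.foldl
    (fun cont_letras c => if c ∈ letras.toList then cont_letras + 1 else cont_letras) 0
  if cont_dig = 8 ∧ cont_letras = 7 then true else false

-- ===== PORT B =====
-- B sums str.count over the two fixed alphabets (one C-level scan per alphabet char) instead of A's per-character loops.
def verifica_digitos_alt (cod_barras : String) : Bool :=
  let cont_dig : Int :=
    ("0123456789".toList.map (fun d => (PySem.Str.count cod_barras (String.ofList [d]) : Int))).sum
  let cont_letras : Int :=
    ("ABCDEFGHIJKLMNOPQRSTUVWXYZ".toList.map (fun l => (PySem.Str.count cod_barras (String.ofList [l]) : Int))).sum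
  decide (cont_dig = 8 ∧ cont_letras = 7)

-- ===== PRECONDITION & SPEC =====
def Spec_verifica_digitos (cod_barras : String) (out : Bool) : Prop := out = verifica_digitos_alt cod_barras
instance (cod_barras : String) (out : Bool) : Decidable (Spec_verifica_digitos cod_barras out) := by unfold Spec_verifica_digitos; infer_instance

-- ===== CLAIM (what is proved, stated in full; the proofs are below) =====
def Claim_equal_verifica_digitos : Prop := ∀ (cod_barras : String), Dom_verifica_digitos cod_barras → Spec_verifica_digitos cod_barras (verifica_digitos cod_barras)

-- ===== LEMMAS AND PROOFS =====

-- ===== VERDICT (by name: the statement is the Claim_ definition above) =====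

lemma count_go_single (d : Char) (l : List Char) : ∀ (acc : Nat),
    PySem.Chars.count.go [d] l.length l acc = acc + l.count d := by
  induction l with
  | nil => intro acc; simp [PySem.Chars.count.go]
  | cons h t ih =>
    intro acc
    rw [List.length_cons, PySem.Chars.count.go]
    by_cases hd : h = d
    · subst hd
      simp [List.isPrefixOf, ih]
      omega
    · have hp : [d].isPrefixOf (h :: t) = false := by
        simp [List.isPrefixOf]; exact fun e => absurd e.symm hd
      simp [hp, ih, hd]

lemma str_count_single (s : String) (d : Char) :
    PySem.Str.count s (String.ofList [d]) = s.toList.count d := by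
  have h1 : (String.ofList [d]).toList = [d] := by simp
  rw [PySem.Str.count, h1, PySem.Chars.count]
  simpa using count_go_single d s.toList 0

lemma sum_counts (ds : List Char) (hnd : ds.Nodup) (l : List Char) :
    (ds.map (fun d => l.count d)).sum = l.countP (fun x => decide (x ∈ ds)) := by
  induction l with
  | nil => simp
  | cons c l ih =>
    simp only [List.count_cons, List.countP_cons]
    rw [List.sum_map_add, ih]
    have key : ∀ (es : List Char), es.Nodup →
        (es.map (fun d => if c = d then 1 else 0)).sum = (if c ∈ es then 1 else 0) := by
      intro es
      induction es with
      | nil => simp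
      | cons e es ihe =>
        intro h
        rcases List.nodup_cons.mp h with ⟨he, hnd'⟩
        by_cases hc : c = e
        · subst hc
          simp [List.map_cons, ihe hnd', he]
        · simp [List.map_cons, ihe hnd', hc]
    simp only [beq_iff_eq, decide_eq_true_eq]
    rw [key ds hnd]

lemma sum_counts_int (ds l : List Char) :
    (ds.map (fun d => ((l.count d : Nat) : Int))).sum = ((ds.map (fun d => l.count d)).sum : Int) := by
  induction ds with
  | nil => simp
  | cons d ds ih => simp [ih]

lemma alt_side (s : String) (ds : List Char) (hnd : ds.Nodup) :
    (ds.map (fun d => (PySem.Str.count s (String.ofList [d]) : Int))).sum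
      = ((s.toList.countP (fun x => decide (x ∈ ds)) : Nat) : Int) := by
  have h : (fun d => ((PySem.Str.count s (String.ofList [d]) : Nat) : Int))
      = fun d => ((s.toList.count d : Nat) : Int) := by
    funext d; rw [str_count_single]
  rw [h, sum_counts_int, sum_counts ds hnd]

lemma a_side (s : String) (ds : List Char) :
    s.toList.foldl (fun acc i => if i ∈ ds then acc + 1 else acc) (0 : Int)
      = ((s.toList.countP (fun x => decide (x ∈ ds)) : Nat) : Int) := by
  rw [PySem.List.foldl_ite_add_one (fun x => x ∈ ds) s.toList 0]
  simp

theorem verifica_digitos_spec : Claim_equal_verifica_digitos := by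
  intro s _
  unfold Spec_verifica_digitos verifica_digitos verifica_digitos_alt
  dsimp only
  rw [a_side s "0123456789".toList, a_side s "ABCDEFGHIJKLMNOPQRSTUVWXYZ".toList,
      alt_side s "0123456789".toList (by decide), alt_side s "ABCDEFGHIJKLMNOPQRSTUVWXYZ".toList (by decide)]
  by_cases h : (((s.toList.countP (fun x => decide (x ∈ "0123456789".toList)) : Nat) : Int) = 8
      ∧ ((s.toList.countP (fun x => decide (x ∈ "ABCDEFGHIJKLMNOPQRSTUVWXYZ".toList)) : Nat) : Int) = 7)
  · rw [if_pos h, decide_eq_true_eq.mpr h]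
  · rw [if_neg h, decide_eq_false h]
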